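-- pv_equiv track=rewrite | github.com/Aadak9/TSEA56-Lagerrobot | RaspberryPi/newmain/fastest_way3.py | node_to_xy
-- ===== SOURCE A (Python) =====
-- def node_to_xy(node, lagerbredd, lagerhöjd):
-- 	nx = lagerbredd + 1
-- 	ny = lagerhöjd + 1
-- 	for i in range(0, nx):
-- 		for j in range(0, ny):
-- 			if node == j + ny * i + 1:
-- 				return(i, j)
-- 			else:
-- 				continue
--
-- 	return(0,0)
-- ===== SOURCE B (Python) =====
-- def node_to_xy(node, lagerbredd, lagerhöjd):
--     nx = lagerbredd + 1
--     ny = lagerhöjd + 1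
--     if nx > 0 and ny > 0 and 1 <= node <= nx * ny:
--         return ((node - 1) // ny, (node - 1) % ny)
--     return (0, 0)
-- ===== Notes on version B (the rewrite author's own statement) =====
-- stated objective: faster
-- what changed: Replaced the nested scan over all grid cells with a direct O(1) arithmetic inversion ((node-1)//ny, (node-1)%ny) guarded by a bounds check, returning (0,0) outside the grid exactly as A's fall-through does.
import Mathlib
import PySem

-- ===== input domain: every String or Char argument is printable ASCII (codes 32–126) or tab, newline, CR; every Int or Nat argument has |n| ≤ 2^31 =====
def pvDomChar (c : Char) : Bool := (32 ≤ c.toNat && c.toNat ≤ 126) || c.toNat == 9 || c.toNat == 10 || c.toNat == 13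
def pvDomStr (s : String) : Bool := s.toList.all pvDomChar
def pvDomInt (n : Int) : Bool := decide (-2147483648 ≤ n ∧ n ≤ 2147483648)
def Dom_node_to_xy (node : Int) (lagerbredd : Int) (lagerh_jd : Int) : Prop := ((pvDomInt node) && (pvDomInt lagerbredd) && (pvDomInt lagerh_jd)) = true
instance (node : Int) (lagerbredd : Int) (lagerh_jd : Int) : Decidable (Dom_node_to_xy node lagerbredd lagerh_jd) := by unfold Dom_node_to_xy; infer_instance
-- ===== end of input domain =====

-- B replaces A's nested grid scan with a constant-time arithmetic inversion
-- ((node-1)//ny, (node-1)%ny) guarded by a bounds check.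

-- ===== PORT A =====
-- 'for j in range(0, ny)' ported as counter recursion (lazy like Python's range; early return):
-- first j in [j0, ny) with node == j + ny*i + 1
def nodeToXyInner (node : Int) (ny : Int) (i : Int) (j : Int) : Option Int :=
  if _h : j < ny then
    if node = j + ny * i + 1 then some j else nodeToXyInner node ny i (j + 1)
  else none
termination_by (ny - j).toNat
decreasing_by omega

-- 'for i in range(0, nx)': first i in [i0, nx) whose inner loop returns
def nodeToXyOuter (node : Int) (ny : Int) (nx : Int) (i : Int) : Option (Int × Int) :=
  if _h : i < nx then
    match nodeToXyInner node ny i 0 with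
    | some j => some (i, j)
    | none => nodeToXyOuter node ny nx (i + 1)
  else none
termination_by (nx - i).toNat
decreasing_by omega

-- nx = lagerbredd + 1, ny = lagerh_jd + 1 inlined
def node_to_xy (node : Int) (lagerbredd : Int) (lagerh_jd : Int) : Int × Int :=
  match nodeToXyOuter node (lagerh_jd + 1) (lagerbredd + 1) 0 with
  | some p => p
  | none => (0, 0)

-- ===== PORT B =====
def node_to_xy_alt (node : Int) (lagerbredd : Int) (lagerh_jd : Int) : Int × Int :=
  if 0 < lagerbredd + 1 ∧ 0 < lagerh_jd + 1 ∧ 1 ≤ node ∧ node ≤ (lagerbredd + 1) * (lagerh_jd + 1) then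
    (PySem.Int.floordiv (node - 1) (lagerh_jd + 1), PySem.Int.mod (node - 1) (lagerh_jd + 1))
  else (0, 0)

-- ===== PRECONDITION & SPEC =====
def Spec_node_to_xy (node : Int) (lagerbredd : Int) (lagerh_jd : Int) (out : Int × Int) : Prop := out = node_to_xy_alt node lagerbredd lagerh_jd
instance (node : Int) (lagerbredd : Int) (lagerh_jd : Int) (out : Int × Int) : Decidable (Spec_node_to_xy node lagerbredd lagerh_jd out) := by unfold Spec_node_to_xy; infer_instance

-- ===== CLAIM (what is proved, stated in full; the proofs are below) =====
def Claim_equal_node_to_xy : Prop := ∀ (node : Int) (lagerbredd : Int) (lagerh_jd : Int), Dom_node_to_xy node lagerbredd lagerh_jd → Spec_node_to_xy node lagerbredd lagerh_jd (node_to_xy node lagerbredd lagerh_jd)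

-- ===== LEMMAS AND PROOFS =====

-- the inner loop from j finds exactly t := node - ny*i - 1 if it lies in [j, ny)
theorem inner_range (node ny i : Int) (j : Int) :
    nodeToXyInner node ny i j =
      if j ≤ node - ny * i - 1 ∧ node - ny * i - 1 < ny then some (node - ny * i - 1) else none := by
  by_cases hj : j < ny
  · have hlt : (ny - (j + 1)).toNat < (ny - j).toNat := by omega
    rw [nodeToXyInner, dif_pos hj]
    by_cases h : node = j + ny * i + 1
    · rw [if_pos h, if_pos (by omega)]
      congr 1; omega
    · rw [if_neg h, inner_range node ny i (j + 1)]
      split_ifs with h1 h2 h3 <;> first | rfl | omega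
  · rw [nodeToXyInner, dif_neg hj, if_neg (by omega)]
termination_by (ny - j).toNat

-- when ny > 0, the outer loop from i finds (q, r) := divmod(node-1, ny) iff i ≤ q < nx
theorem outer_range (node ny : Int) (hny : 0 < ny) (nx i : Int) :
    nodeToXyOuter node ny nx i =
      if i ≤ PySem.Int.floordiv (node - 1) ny ∧ PySem.Int.floordiv (node - 1) ny < nx then
        some (PySem.Int.floordiv (node - 1) ny, PySem.Int.mod (node - 1) ny)
      else none := by
  have hdm := PySem.Int.floordiv_mul_add_mod (node - 1) ny
  have hr0 := PySem.Int.mod_nonneg (node - 1) hny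
  have hr1 := PySem.Int.mod_lt (node - 1) hny
  set q := PySem.Int.floordiv (node - 1) ny with hq
  set r := PySem.Int.mod (node - 1) ny with hr
  by_cases hi : i < nx
  · have hlt : (nx - (i + 1)).toNat < (nx - i).toNat := by omega
    rw [nodeToXyOuter, dif_pos hi]
    rw [inner_range]
    by_cases hiq : i = q
    · have hin : 0 ≤ node - ny * i - 1 ∧ node - ny * i - 1 < ny := by
        subst hiq
        have : ny * q = q * ny := mul_comm _ _
        omega
      rw [if_pos hin, if_pos (by omega)]
      have : node - ny * i - 1 = r := by
        subst hiq
        have : ny * q = q * ny := mul_comm _ _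
        omega
      rw [this, hiq]
    · have hout : ¬ (0 ≤ node - ny * i - 1 ∧ node - ny * i - 1 < ny) := by
        rintro ⟨h0, h1⟩
        rcases lt_or_gt_of_ne hiq with hlt' | hgt'
        · have h2 : 1 * ny ≤ (q - i) * ny :=
            mul_le_mul_of_nonneg_right (by omega) (le_of_lt hny)
          nlinarith
        · have h2 : (q - i) * ny ≤ (-1) * ny :=
            mul_le_mul_of_nonneg_right (by omega) (le_of_lt hny)
          nlinarith
      rw [if_neg hout, outer_range node ny hny nx (i + 1)]
      split_ifs with h1 h2 h3 <;> first | rfl | omega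
  · rw [nodeToXyOuter, dif_neg hi, if_neg (by omega)]
termination_by (nx - i).toNat

-- when ny ≤ 0, the inner range is empty: no row ever matches
theorem outer_none_of_nonpos (node ny : Int) (hny : ny ≤ 0) (nx i : Int) :
    nodeToXyOuter node ny nx i = none := by
  by_cases hi : i < nx
  · have hlt : (nx - (i + 1)).toNat < (nx - i).toNat := by omega
    rw [nodeToXyOuter, dif_pos hi, inner_range, if_neg (by omega),
        outer_none_of_nonpos node ny hny nx (i + 1)]
  · rw [nodeToXyOuter, dif_neg hi]
termination_by (nx - i).toNat

-- ===== VERDICT (by name: the statement is the Claim_ definition above) =====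
theorem node_to_xy_spec : Claim_equal_node_to_xy := by
  intro node lb lh _
  unfold Spec_node_to_xy node_to_xy node_to_xy_alt
  set nx := lb + 1 with hnx
  set ny := lh + 1 with hny
  by_cases hpos : 0 < ny
  · have hdm := PySem.Int.floordiv_mul_add_mod (node - 1) ny
    have hr0 := PySem.Int.mod_nonneg (node - 1) hpos
    have hr1 := PySem.Int.mod_lt (node - 1) hpos
    set q := PySem.Int.floordiv (node - 1) ny with hq
    set r := PySem.Int.mod (node - 1) ny with hr
    rw [outer_range node ny hpos nx 0]
    by_cases hc : 0 ≤ q ∧ q < nx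
    · rw [if_pos hc]
      have hcond : 0 < nx ∧ 0 < ny ∧ 1 ≤ node ∧ node ≤ nx * ny := by
        refine ⟨by omega, hpos, ?_, ?_⟩
        · nlinarith
        · have h2 : (q + 1) * ny ≤ nx * ny := by
            apply mul_le_mul_of_nonneg_right (by omega) (le_of_lt hpos)
          nlinarith
      rw [if_pos hcond]
    · rw [if_neg hc]
      have hcond : ¬ (0 < nx ∧ 0 < ny ∧ 1 ≤ node ∧ node ≤ nx * ny) := by
        rintro ⟨h1, _, h3, h4⟩
        apply hc
        constructor
        · by_contra hq0
          push_neg at hq0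
          have h2 : q * ny ≤ (-1) * ny := by
            apply mul_le_mul_of_nonneg_right (by omega) (le_of_lt hpos)
          nlinarith
        · by_contra hqn
          push_neg at hqn
          have h2 : nx * ny ≤ q * ny := by
            apply mul_le_mul_of_nonneg_right (by omega) (le_of_lt hpos)
          nlinarith
      rw [if_neg hcond]
  · push_neg at hpos
    rw [outer_none_of_nonpos node ny hpos nx 0, if_neg (by omega)]
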